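-- pv_equiv track=rewrite | github.com/dawoodaijaz97/Leetcode | maximum-number-of-subsequences-after-one-inserting/solution.py | solve
-- ===== SOURCE A (Python) =====
-- def solve(s: str) -> int:
--     """
--     Calculate the maximum number of "LCT" subsequences that can be formed
--     in the string `s` after inserting at most one uppercase English letter.
--
--     :param s: Input string consisting of uppercase English letters.
--     :return: Maximum number of "LCT" subsequences possible.
--     """
--     count_L = 0
--     count_C = 0
--     max_subsequences = 0
--
--     for char in s:
--         if char == 'T':
--             max_subsequences += count_L * count_C
--
--         if char == 'C':
--             count_C += 1
--         elif char == 'L':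
--             count_L += 1
--
--     # Consider inserting 'L' at the beginning
--     max_subsequences = max(max_subsequences, count_C)
--
--     # Consider inserting 'C' after each 'L'
--     max_subsequences = max(max_subsequences, count_L * (len(s) - count_L + 1))
--
--     return max_subsequences
-- ===== SOURCE B (Python) =====
-- def solve(s: str) -> int:
--     # Staged decomposition: first build prefix-count tables of L's and C's,
--     # then sum prefL[i]*prefC[i] over the 'T' positions via zip.
--     prefL = [0]
--     prefC = [0]
--     for ch in s:
--         prefL.append(prefL[-1] + (1 if ch == 'L' else 0))
--         prefC.append(prefC[-1] + (1 if ch == 'C' else 0))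
--     base = 0
--     for ch, l, c in zip(s, prefL, prefC):
--         if ch == 'T':
--             base += l * c
--     return max(max(base, prefC[-1]), prefL[-1] * (len(s) - prefL[-1] + 1))
-- ===== Notes on version B (the rewrite author's own statement) =====
-- stated objective: alternative
-- what changed: B replaces A's single accumulator pass by a staged computation: it first materialises prefix-count tables of L's and C's, then sums prefL[i]*prefC[i] over the 'T' positions with a zip, reading the totals off the tables' last entries; the two insertion max-adjustments are unchanged.
import Mathlib
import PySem

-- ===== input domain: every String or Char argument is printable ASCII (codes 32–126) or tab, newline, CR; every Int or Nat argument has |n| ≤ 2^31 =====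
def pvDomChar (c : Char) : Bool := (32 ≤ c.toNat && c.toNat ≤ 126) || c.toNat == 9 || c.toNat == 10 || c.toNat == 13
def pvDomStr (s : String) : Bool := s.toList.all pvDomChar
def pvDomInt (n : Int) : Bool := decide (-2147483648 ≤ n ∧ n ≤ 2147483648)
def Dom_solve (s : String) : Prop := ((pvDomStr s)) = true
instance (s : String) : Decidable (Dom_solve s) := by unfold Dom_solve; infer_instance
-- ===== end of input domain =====

-- B is a staged re-decomposition: it builds prefix-count tables of L's and C's first,
-- then sums prefL[i]*prefC[i] over the 'T' positions via zip; same O(n) cost.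

-- ===== PORT A =====
-- state: (count_L, count_C, max_subsequences)
def solveStep (st : Int × Int × Int) (ch : Char) : Int × Int × Int :=
  let m := if ch = 'T' then st.2.2 + st.1 * st.2.1 else st.2.2
  if ch = 'C' then (st.1, st.2.1 + 1, m)
  else if ch = 'L' then (st.1 + 1, st.2.1, m)
  else (st.1, st.2.1, m)

def solve (s : String) : Int :=
  let st := s.toList.foldl solveStep (0, 0, 0)
  let m1 := max st.2.2 st.2.1
  max m1 (st.1 * (PySem.Str.len s - st.1 + 1))

-- ===== PORT B =====
-- one append step of the table-building loop; pr[-1] is ported with pyGetD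
-- (exact: pr is never empty, it starts as [0] and only grows)
def tableStep (target : Char) (pr : List Int) (ch : Char) : List Int :=
  pr ++ [PySem.List.pyGetD pr (-1) 0 + (if ch = target then (1 : Int) else 0)]

def solve_alt (s : String) : Int :=
  let cs := s.toList
  let prefL := cs.foldl (tableStep 'L') [0]
  let prefC := cs.foldl (tableStep 'C') [0]
  let base := (cs.zip (prefL.zip prefC)).foldl
    (fun b p => if p.1 = 'T' then b + p.2.1 * p.2.2 else b) 0
  let totC := PySem.List.pyGetD prefC (-1) 0
  let totL := PySem.List.pyGetD prefL (-1) 0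
  max (max base totC) (totL * (PySem.Str.len s - totL + 1))

-- ===== PRECONDITION & SPEC =====
def Spec_solve (s : String) (out : Int) : Prop := out = solve_alt s
instance (s : String) (out : Int) : Decidable (Spec_solve s out) := by unfold Spec_solve; infer_instance

-- ===== CLAIM =====
def Claim_equal_solve : Prop := ∀ (s : String), Dom_solve s → Spec_solve s (solve s)

-- ===== LEMMAS AND PROOFS =====

-- indicator of a character
def ind (target : Char) (c : Char) : Int := if c = target then 1 else 0

-- running-sum list of indicators (the tail of a prefix table starting at a)
def scanAdd (target : Char) : Int → List Char → List Int
  | _, [] => []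
  | a, c :: t => (a + ind target c) :: scanAdd target (a + ind target c) t

-- total indicator count
def cnt (target : Char) : List Char → Int
  | [] => 0
  | c :: t => ind target c + cnt target t

-- the common abstract value: sum over 'T' positions of (L's before)*(C's before)
def zsum : List Char → Int → Int → Int
  | [], _, _ => 0
  | c :: t, a, b =>
    (if c = 'T' then a * b else 0) + zsum t (a + ind 'L' c) (b + ind 'C' c)

theorem build_table (target : Char) :
    ∀ (l : List Char) (pre : List Int) (x : Int),
      l.foldl (tableStep target) (pre ++ [x]) = pre ++ [x] ++ scanAdd target x l := by
  intro l
  induction l with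
  | nil => intro pre x; simp [scanAdd]
  | cons c t ih =>
    intro pre x
    have hstep : tableStep target (pre ++ [x]) c = (pre ++ [x]) ++ [x + ind target c] := by
      simp [tableStep, PySem.List.pyGetD_neg_one_append_singleton, ind]
    simp only [List.foldl_cons, hstep]
    rw [ih (pre ++ [x]) (x + ind target c)]
    simp [scanAdd]

theorem scan_last (target : Char) :
    ∀ (l : List Char) (a : Int),
      ∃ pre, a :: scanAdd target a l = pre ++ [a + cnt target l] := by
  intro l
  induction l with
  | nil => intro a; exact ⟨[], by simp [scanAdd, cnt]⟩
  | cons c t ih =>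
    intro a
    obtain ⟨pre, hpre⟩ := ih (a + ind target c)
    exact ⟨a :: pre, by simp [scanAdd, cnt, hpre]; ring_nf⟩

theorem pyGetD_scan_last (target : Char) (l : List Char) (a : Int) :
    PySem.List.pyGetD (a :: scanAdd target a l) (-1) 0 = a + cnt target l := by
  obtain ⟨pre, hpre⟩ := scan_last target l a
  rw [hpre, PySem.List.pyGetD_neg_one_append_singleton]

theorem foldA : ∀ (l : List Char) (l0 c0 m0 : Int),
    l.foldl solveStep (l0, c0, m0) = (l0 + cnt 'L' l, c0 + cnt 'C' l, m0 + zsum l l0 c0) := by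
  intro l
  induction l with
  | nil => intro l0 c0 m0; simp [cnt, zsum]
  | cons c t ih =>
    intro l0 c0 m0
    simp only [List.foldl_cons, solveStep]
    by_cases hC : c = 'C'
    · subst hC
      rw [if_pos rfl, if_neg (by decide)]
      rw [ih]
      simp [cnt, zsum, ind]
      ring
    · by_cases hL : c = 'L'
      · subst hL
        rw [if_neg (by decide), if_pos rfl, if_neg (by decide)]
        rw [ih]
        simp [cnt, zsum, ind]
        ring
      · rw [if_neg hC, if_neg hL]
        by_cases hT : c = 'T'
        · subst hT
          rw [if_pos rfl, ih]
          simp [cnt, zsum, ind]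
          ring
        · rw [if_neg hT, ih]
          simp [cnt, zsum, ind, hC, hL, hT]

theorem foldB : ∀ (l : List Char) (a b z : Int),
    ((l.zip ((a :: scanAdd 'L' a l).zip (b :: scanAdd 'C' b l))).foldl
      (fun acc p => if p.1 = 'T' then acc + p.2.1 * p.2.2 else acc) z) = z + zsum l a b := by
  intro l
  induction l with
  | nil => intro a b z; simp [zsum]
  | cons c t ih =>
    intro a b z
    simp only [scanAdd, List.zip_cons_cons, List.foldl_cons]
    rw [← List.zip_cons_cons, ih]
    by_cases hT : c = 'T'
    · subst hT; simp [zsum]; ring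
    · simp [zsum, hT]

-- ===== VERDICT =====
theorem solve_spec : Claim_equal_solve := by
  unfold Claim_equal_solve
  intro s _
  unfold Spec_solve solve solve_alt
  dsimp only
  have hL := build_table 'L' s.toList [] 0
  have hC := build_table 'C' s.toList [] 0
  simp only [List.nil_append] at hL hC
  rw [hL, hC, foldA]
  simp only [List.singleton_append]
  rw [foldB, pyGetD_scan_last, pyGetD_scan_last]
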